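-- pv_equiv track=rewrite | github.com/PragalvaXFREZ/meshery-schemas | build/scripts/api-audit.py | _merge_methods
-- ===== SOURCE A (Python) =====
-- from typing import Any, Dict, List, Optional, Set, Tuple
--
-- def _method_sort_key(method: str) -> Tuple[int, str]:
--     order = {
--         "ALL": 0,
--         "GET": 1,
--         "POST": 2,
--         "PUT": 3,
--         "PATCH": 4,
--         "DELETE": 5,
--         "OPTIONS": 6,
--         "HEAD": 7,
--     }
--     return order.get(method, 99), method
--
-- def _merge_methods(method_values: List[str]) -> str:
--     merged: Set[str] = set()
--     for raw in method_values:
--         for method in raw.replace(";", ",").split(","):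
--             method = method.strip().upper()
--             if method:
--                 merged.add(method)
--     return ", ".join(sorted(merged, key=_method_sort_key))
-- ===== SOURCE B (Python) =====
-- from typing import List
--
-- _CANONICAL = ["ALL", "GET", "POST", "PUT", "PATCH", "DELETE", "OPTIONS", "HEAD"]
--
-- def _merge_methods(method_values: List[str]) -> str:
--     tokens = [t.strip().upper()
--               for raw in method_values
--               for t in raw.replace(";", ",").split(",")]
--     merged = {t for t in tokens if t}
--     ordered = [m for m in _CANONICAL if m in merged]
--     extras = sorted(t for t in merged if t not in _CANONICAL)
--     return ", ".join(ordered + extras)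
-- ===== Notes on version B (the rewrite author's own statement) =====
-- stated objective: simpler
-- what changed: B replaces A's nested dedup loops and key-function sort with a flat comprehension collected into a set, then a single scan of the fixed canonical method list plus a plain sort of only the unknown methods.
import Mathlib
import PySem

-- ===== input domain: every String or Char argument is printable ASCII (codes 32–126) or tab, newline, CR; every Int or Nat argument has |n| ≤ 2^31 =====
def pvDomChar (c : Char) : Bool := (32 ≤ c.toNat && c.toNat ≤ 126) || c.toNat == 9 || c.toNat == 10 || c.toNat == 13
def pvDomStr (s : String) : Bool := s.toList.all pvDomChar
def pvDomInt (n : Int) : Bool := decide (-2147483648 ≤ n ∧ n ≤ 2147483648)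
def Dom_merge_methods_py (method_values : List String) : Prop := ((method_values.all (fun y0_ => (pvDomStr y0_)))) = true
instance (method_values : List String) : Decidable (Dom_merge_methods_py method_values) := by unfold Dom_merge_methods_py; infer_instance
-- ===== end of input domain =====

-- B replaces A's nested dedup loops and key-function sort by a flat comprehension into a set,
-- a single scan of the fixed canonical method list, and a plain sort of only the unknown methods (simpler; same cost).

-- ===== PORT A =====
-- raw.replace(";", ",").split(",") — exact via PySem.Chars.replace / PySem.Chars.splitOn (the separator "," is nonempty)
def pvSplit (s : String) : List String :=
  (PySem.Chars.splitOn (PySem.Chars.replace s.toList [';'] [',']) [',']).map String.ofList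

def method_sort_key_py (method : String) : Int × String :=
  let order : PySem.Dict String Int := PySem.Dict.ofList
    [("ALL", 0), ("GET", 1), ("POST", 2), ("PUT", 3),
     ("PATCH", 4), ("DELETE", 5), ("OPTIONS", 6), ("HEAD", 7)]
  (order.getD method 99, method)

def merge_methods_py (method_values : List String) : String :=
  let merged : PySem.Set String :=
    method_values.foldl (fun acc raw =>
      (pvSplit raw).foldl (fun acc tok =>
        let m := PySem.Str.upper (PySem.Str.strip tok)
        if m ≠ "" then PySem.Set.add acc m else acc) acc) PySem.Set.empty
  PySem.Str.join ", " (PySem.List.sorted2 merged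
    (fun m => (method_sort_key_py m).1) (fun m => (method_sort_key_py m).2))

-- ===== PORT B =====
def pvCanon : List String := ["ALL", "GET", "POST", "PUT", "PATCH", "DELETE", "OPTIONS", "HEAD"]

def merge_methods_py_alt (method_values : List String) : String :=
  let tokens := (method_values.flatMap (fun raw => pvSplit raw)).map
    (fun t => PySem.Str.upper (PySem.Str.strip t))
  let merged : PySem.Set String := PySem.Set.ofList (tokens.filter (fun t => t ≠ ""))
  let ordered := pvCanon.filter (fun m => PySem.Set.contains merged m)
  let extras := PySem.List.sorted (merged.filter (fun t => !pvCanon.contains t)) (fun x => x) false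
  PySem.Str.join ", " (ordered ++ extras)

-- ===== PRECONDITION & SPEC =====
def Spec_merge_methods_py (method_values : List String) (out : String) : Prop := out = merge_methods_py_alt method_values
instance (method_values : List String) (out : String) : Decidable (Spec_merge_methods_py method_values out) := by unfold Spec_merge_methods_py; infer_instance

-- ===== CLAIM (what is proved, stated in full; the proofs are below) =====
def Claim_equal_merge_methods_py : Prop := ∀ (method_values : List String), Dom_merge_methods_py method_values → Spec_merge_methods_py method_values (merge_methods_py method_values)

-- ===== LEMMAS AND PROOFS =====

-- the normalisation applied to every token, and the flat token list both programs deduplicate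
def pvNorm (t : String) : String := PySem.Str.upper (PySem.Str.strip t)

def pvFlat (method_values : List String) : List String :=
  method_values.flatMap (fun raw => ((pvSplit raw).map pvNorm).filter (fun t => t ≠ ""))

-- A's inner loop is Set.update with the filtered, normalised tokens
theorem pv_inner_loop (l : List String) (s : PySem.Set String) :
    l.foldl (fun acc tok =>
      let m := PySem.Str.upper (PySem.Str.strip tok)
      if m ≠ "" then PySem.Set.add acc m else acc) s
    = PySem.Set.update s ((l.map pvNorm).filter (fun t => t ≠ "")) := by
  induction l generalizing s with
  | nil => show s = _; rfl
  | cons t l ih =>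
    rw [List.foldl_cons, ih]
    show PySem.Set.update (if pvNorm t ≠ "" then PySem.Set.add s (pvNorm t) else s) _ = _
    by_cases h : pvNorm t = ""
    · rw [if_neg (by simp [h]), List.map_cons, List.filter_cons, if_neg (by simp [h])]
    · rw [if_pos h, List.map_cons, List.filter_cons, if_pos (by simp [h]), PySem.Set.update_cons]

-- A's outer loop over updates is one update with the concatenation
theorem pv_outer_loop (mv : List String) (s : PySem.Set String) :
    mv.foldl (fun acc raw => PySem.Set.update acc ((pvSplit raw).map pvNorm |>.filter (fun t => t ≠ ""))) s
    = PySem.Set.update s (pvFlat mv) := by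
  induction mv generalizing s with
  | nil => rfl
  | cons raw mv ih =>
    rw [List.foldl_cons, ih]
    show _ = PySem.Set.update s (pvFlat (raw :: mv))
    rw [show pvFlat (raw :: mv) = ((pvSplit raw).map pvNorm |>.filter (fun t => t ≠ "")) ++ pvFlat mv from rfl,
        PySem.Set.update_append]

-- sorted2 with keys (k1, k2) is sorted with the lexicographic key
theorem pv_sorted2_eq_sorted_lex (xs : List String) (k1 : String → Int) (k2 : String → String) :
    PySem.List.sorted2 xs k1 k2 false
    = PySem.List.sorted xs (fun a => toLex (k1 a, k2 a)) false := by
  unfold PySem.List.sorted2 PySem.List.sorted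
  simp only [if_neg (by decide : ¬ (false = true))]
  congr 1
  funext acc x
  congr 1
  funext a b
  rcases lt_trichotomy (k1 a) (k1 b) with h | h | h
  · simp [Prod.Lex.lt_iff, h, not_lt.2 (le_of_lt h)]
  · simp [Prod.Lex.lt_iff, h]
  · simp [Prod.Lex.lt_iff, h, not_lt.2 (le_of_lt h), ne_of_gt h]

-- the rank of a method outside the canonical list is 99
theorem pv_rank_of_not_canon (m : String) (h : pvCanon.contains m = false) :
    (method_sort_key_py m).1 = 99 := by
  rw [List.contains_eq_mem] at h
  simp only [pvCanon, decide_eq_false_iff_not, List.mem_cons, List.not_mem_nil, or_false, not_or] at h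
  obtain ⟨h1, h2, h3, h4, h5, h6, h7, h8⟩ := h
  have e1 : ("ALL" == m) = false := beq_eq_false_iff_ne.2 (Ne.symm h1)
  have e2 : ("GET" == m) = false := beq_eq_false_iff_ne.2 (Ne.symm h2)
  have e3 : ("POST" == m) = false := beq_eq_false_iff_ne.2 (Ne.symm h3)
  have e4 : ("PUT" == m) = false := beq_eq_false_iff_ne.2 (Ne.symm h4)
  have e5 : ("PATCH" == m) = false := beq_eq_false_iff_ne.2 (Ne.symm h5)
  have e6 : ("DELETE" == m) = false := beq_eq_false_iff_ne.2 (Ne.symm h6)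
  have e7 : ("OPTIONS" == m) = false := beq_eq_false_iff_ne.2 (Ne.symm h7)
  have e8 : ("HEAD" == m) = false := beq_eq_false_iff_ne.2 (Ne.symm h8)
  have hitems : (PySem.Dict.ofList ([("ALL", 0), ("GET", 1), ("POST", 2), ("PUT", 3),
      ("PATCH", 4), ("DELETE", 5), ("OPTIONS", 6), ("HEAD", 7)] : List (String × Int))).items
      = [("ALL", 0), ("GET", 1), ("POST", 2), ("PUT", 3),
      ("PATCH", 4), ("DELETE", 5), ("OPTIONS", 6), ("HEAD", 7)] := by decide
  simp [method_sort_key_py, PySem.Dict.getD, PySem.Dict.get?, hitems, List.find?, e1, e2, e3, e4, e5, e6, e7, e8]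

-- A's sort key, packaged as one lexicographic key
def pvKey (m : String) : Lex (Int × String) := toLex ((method_sort_key_py m).1, m)

theorem pv_canon_pairwise : pvCanon.Pairwise (fun a b => pvKey a < pvKey b) := by decide

theorem pv_rank_lt_of_canon (a : String) (ha : a ∈ pvCanon) :
    (method_sort_key_py a).1 < 99 := by
  fin_cases ha <;> decide

-- the ordering lemma: sorting a duplicate-free list by A's key = canonical scan ++ sorted unknowns
theorem pv_order (M : List String) (hnd : M.Nodup) :
    PySem.List.sorted2 M (fun m => (method_sort_key_py m).1) (fun m => (method_sort_key_py m).2) false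
    = pvCanon.filter (fun m => PySem.Set.contains M m)
      ++ PySem.List.sorted (M.filter (fun t => !pvCanon.contains t)) (fun x => x) false := by
  have hkey : (fun a => toLex ((method_sort_key_py a).1, (method_sort_key_py a).2)) = pvKey := rfl
  rw [pv_sorted2_eq_sorted_lex M _ _, hkey]
  apply PySem.List.sorted_eq_of_perm_of_pairwise_lt
  · -- permutation
    have h1 : (pvCanon.filter (fun m => PySem.Set.contains M m)).Perm
        (M.filter (fun t => pvCanon.contains t)) := by
      rw [List.perm_ext_iff_of_nodup ((by decide : pvCanon.Nodup).filter _) (hnd.filter _)]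
      intro x
      simp only [List.mem_filter, PySem.Set.contains, List.contains_eq_mem, decide_eq_true_eq]
      tauto
    have h2 := PySem.List.sorted_perm (M.filter (fun t => !pvCanon.contains t)) (fun x => x) false
    exact (h1.append h2).trans (List.filter_append_perm _ M)
  · rw [List.pairwise_append]
    refine ⟨pv_canon_pairwise.sublist List.filter_sublist, ?_, ?_⟩
    · -- extras strictly increasing under pvKey
      have hndS : (PySem.List.sorted (M.filter (fun t => !pvCanon.contains t)) (fun x => x) false).Nodup :=
        ((PySem.List.sorted_perm _ _ _).nodup_iff).2 (hnd.filter _)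
      have hle := PySem.List.sorted_pairwise (M.filter (fun t => !pvCanon.contains t)) (fun x => x)
      refine List.Pairwise.imp_of_mem ?_ (hle.and hndS)
      intro a b ha hb hab
      have ha' : (method_sort_key_py a).1 = 99 := by
        have := ((PySem.List.mem_sorted _ _ _ _).1 ha)
        have := (List.mem_filter.1 this).2
        exact pv_rank_of_not_canon a (by simpa using this)
      have hb' : (method_sort_key_py b).1 = 99 := by
        have := ((PySem.List.mem_sorted _ _ _ _).1 hb)
        have := (List.mem_filter.1 this).2
        exact pv_rank_of_not_canon b (by simpa using this)
      exact Prod.Lex.lt_iff.2 (Or.inr ⟨by show (method_sort_key_py a).1 = (method_sort_key_py b).1; rw [ha', hb'], lt_of_le_of_ne hab.1 hab.2⟩)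
    · -- canon methods before unknowns
      intro a ha b hb
      have haC : a ∈ pvCanon := (List.mem_filter.1 ha).1
      have hb' : (method_sort_key_py b).1 = 99 := by
        have := ((PySem.List.mem_sorted _ _ _ _).1 hb)
        have := (List.mem_filter.1 this).2
        exact pv_rank_of_not_canon b (by simpa using this)
      exact Prod.Lex.lt_iff.2 (Or.inl (by show (method_sort_key_py a).1 < (method_sort_key_py b).1; rw [hb']; exact pv_rank_lt_of_canon a haC))

-- ===== VERDICT (by name: the statement is the Claim_ definition above) =====
theorem merge_methods_py_spec : Claim_equal_merge_methods_py := by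
  intro mv _
  unfold Spec_merge_methods_py merge_methods_py merge_methods_py_alt
  have hA : mv.foldl (fun acc raw =>
      (pvSplit raw).foldl (fun acc tok =>
        let m := PySem.Str.upper (PySem.Str.strip tok)
        if m ≠ "" then PySem.Set.add acc m else acc) acc) PySem.Set.empty
      = PySem.Set.ofList (pvFlat mv) := by
    calc _ = mv.foldl (fun acc raw => PySem.Set.update acc ((pvSplit raw).map pvNorm |>.filter (fun t => t ≠ ""))) PySem.Set.empty := by
            simp only [pv_inner_loop]
      _ = PySem.Set.update PySem.Set.empty (pvFlat mv) := pv_outer_loop mv _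
      _ = PySem.Set.ofList (pvFlat mv) := by
            simp [PySem.Set.update, PySem.Set.ofList, PySem.Set.empty]
  have hB : ((mv.flatMap (fun raw => pvSplit raw)).map
      (fun t => PySem.Str.upper (PySem.Str.strip t))).filter (fun t => t ≠ "")
      = pvFlat mv := by
    simp only [pvFlat, List.map_flatMap, List.filter_flatMap]
    rfl
  dsimp only
  rw [hA, hB, pv_order _ (PySem.Set.nodup_ofList _)]
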